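-- pv_equiv track=rewrite | github.com/MHThe1/AI-ML-CSE422-LAB-BRACU | LAB_ASS_2/22101107_Md. Mehedi Hasan Tanvir_CSE422_05_Assignment02_Summer2024.py | cons_penalty
-- ===== SOURCE A (Python) =====
-- def cons_penalty(s_chromo, step, slots):
--   cons_penalty = 0
--   val = 0
--   for i in range(step):
--     val = 0
--     for j in range(slots):
--       val += int(s_chromo[j][i])
--     if val != 0:
--       cons_penalty += val - 1
--   return(cons_penalty)
-- ===== SOURCE B (Python) =====
-- def cons_penalty(s_chromo, step, slots):
--     colsums = [0] * step
--     for row in s_chromo[:max(0, slots)]: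
--         colsums = [c + int(x) for c, x in zip(colsums, row)]
--     return sum(colsums) - sum(1 for c in colsums if c != 0)
-- ===== Notes on version B (the rewrite author's own statement) =====
-- stated objective: alternative
-- what changed: Replaces the column-major nested loops (one conditional accumulator per column) by a single row-major pass maintaining a whole vector of column sums via zip, closing with the identity penalty = grand total - number of nonzero-sum columns.
import Mathlib
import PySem

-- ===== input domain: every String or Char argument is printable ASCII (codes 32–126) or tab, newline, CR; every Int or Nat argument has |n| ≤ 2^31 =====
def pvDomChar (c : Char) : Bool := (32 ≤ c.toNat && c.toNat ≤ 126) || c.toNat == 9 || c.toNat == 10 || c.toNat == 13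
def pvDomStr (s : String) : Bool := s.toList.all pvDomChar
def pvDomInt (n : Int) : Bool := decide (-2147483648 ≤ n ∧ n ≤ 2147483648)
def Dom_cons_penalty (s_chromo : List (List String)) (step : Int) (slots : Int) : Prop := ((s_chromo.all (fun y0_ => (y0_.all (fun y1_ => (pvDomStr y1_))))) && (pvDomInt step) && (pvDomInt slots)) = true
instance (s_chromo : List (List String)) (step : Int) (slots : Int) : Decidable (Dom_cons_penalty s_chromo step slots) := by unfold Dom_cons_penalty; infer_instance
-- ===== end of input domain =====

-- B replaces A's column-major nested loops by one row-major pass over a vector of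
-- column sums (zip), then uses penalty = grand total - #nonzero columns (alternative decomposition).


-- ===== PORT A =====
-- literal port of A: for each column i, sum int(s_chromo[j][i]) over rows j; add val-1 when val ≠ 0.
-- pyGetD/ofStr?.getD defaults are only reached where Python raises (excluded by Pre_).
def cons_penalty (s_chromo : List (List String)) (step : Int) (slots : Int) : Int :=
  (PySem.List.pyRange 0 step 1).foldl (fun acc i =>
    let val : Int := (PySem.List.pyRange 0 slots 1).foldl (fun v j =>
      v + (PySem.Int.ofStr? (PySem.List.pyGetD (PySem.List.pyGetD s_chromo j []) i "")).getD 0) 0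
    if val ≠ 0 then acc + (val - 1) else acc) 0

-- ===== PORT B =====
-- literal port of B: colsums = [0]*step; for each row of s_chromo[:max(0,slots)],
-- colsums = [c + int(x) for c,x in zip(colsums,row)]; return sum(colsums) - count of nonzero colsums.
def cons_penalty_alt (s_chromo : List (List String)) (step : Int) (slots : Int) : Int :=
  let init : List Int := List.replicate step.toNat 0
  let colsums : List Int := (PySem.List.slice s_chromo none (some (max 0 slots))).foldl
    (fun cs row => List.zipWith (fun c x => c + (PySem.Int.ofStr? x).getD 0) cs row) init
  colsums.foldl (· + ·) 0 - ((colsums.filter (fun c => c ≠ 0)).length : Int)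

-- ===== PRECONDITION & SPEC =====
-- Pre_ excludes exactly the inputs where Python A raises: with positive step and slots it needs
-- slots rows, each with at least step cells, the first step cells of each parsing as int.
def Pre_cons_penalty (s_chromo : List (List String)) (step : Int) (slots : Int) : Prop :=
  0 < step → 0 < slots →
    slots.toNat ≤ s_chromo.length ∧
    ∀ row ∈ s_chromo.take slots.toNat, step.toNat ≤ row.length ∧
      ∀ x ∈ row.take step.toNat, (PySem.Int.ofStr? x).isSome
instance (s_chromo : List (List String)) (step : Int) (slots : Int) : Decidable (Pre_cons_penalty s_chromo step slots) := by unfold Pre_cons_penalty; infer_instance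

def pvWitness_cons_penalty : List (List String) × Int × Int := ([["1", "2"], ["0", "3"]], 2, 2)

def Spec_cons_penalty (s_chromo : List (List String)) (step : Int) (slots : Int) (out : Int) : Prop := out = cons_penalty_alt s_chromo step slots
instance (s_chromo : List (List String)) (step : Int) (slots : Int) (out : Int) : Decidable (Spec_cons_penalty s_chromo step slots out) := by unfold Spec_cons_penalty; infer_instance

-- ===== CLAIM (what is proved, stated in full; the proofs are below) =====
def Claim_equal_cons_penalty : Prop := ∀ (s_chromo : List (List String)) (step : Int) (slots : Int), Dom_cons_penalty s_chromo step slots → Pre_cons_penalty s_chromo step slots → Spec_cons_penalty s_chromo step slots (cons_penalty s_chromo step slots)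

-- ===== LEMMAS AND PROOFS =====

-- zipWith step of B on a range-indexed accumulator, read back pointwise.
lemma zip_map_range (p : String → Int) (r : List String) (n : ℕ) (hn : n ≤ r.length)
    (h : ℕ → Int) :
    List.zipWith (fun c x => c + p x) ((List.range n).map h) r
      = (List.range n).map (fun k => h k + p (r.getD k "")) := by
  apply List.ext_getElem
  · simp; omega
  · intro k h1 h2
    have hk : k < n := by simpa using h2
    have hkr : k < r.length := lt_of_lt_of_le hk hn
    simp [List.getElem_zipWith, List.getD_eq_getElem?_getD, List.getElem?_eq_getElem hkr]

-- B's fold over the rows maintains, at each column index k, the running sum of parsed cells.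
lemma fold_zip (p : String → Int) (n : ℕ) :
    ∀ (rows : List (List String)), (∀ r ∈ rows, n ≤ r.length) → ∀ (h : ℕ → Int),
    rows.foldl (fun cs r => List.zipWith (fun c x => c + p x) cs r) ((List.range n).map h)
      = (List.range n).map (fun k => rows.foldl (fun v r => v + p (r.getD k "")) (h k)) := by
  intro rows
  induction rows with
  | nil => intro _ h; simp
  | cons r rows ih =>
    intro hlen h
    simp only [List.foldl_cons]
    rw [zip_map_range p r n (hlen r List.mem_cons_self) h,
        ih (fun r' hr' => hlen r' (List.mem_cons_of_mem _ hr')) (fun k => h k + p (r.getD k ""))]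

-- folding A's per-column conditional over a list of column sums is total minus #nonzero.
lemma foldl_penalty (M : List Int) :
    ∀ a : Int, M.foldl (fun acc v => if v ≠ 0 then acc + (v - 1) else acc) a
      = a + M.sum - ((M.filter (fun c => c ≠ 0)).length : Int) := by
  induction M with
  | nil => intro a; simp
  | cons v M ih =>
    intro a
    simp only [List.foldl_cons, List.sum_cons, List.filter_cons]
    by_cases hv : v = 0
    · subst hv
      rw [if_neg (by simp), if_neg (by simp), ih]
      ring
    · rw [if_pos (by simpa using hv), if_pos (by simpa using hv), ih]
      simp only [List.length_cons]
      push_cast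
      ring

-- B's fold started from the empty accumulator stays empty.
lemma foldl_zip_nil (f : Int → String → Int) (rows : List (List String)) :
    rows.foldl (fun cs r => List.zipWith f cs r) [] = ([] : List Int) := by
  induction rows with
  | nil => rfl
  | cons r rows ih => simpa using ih

-- ===== VERDICT (by name: the statement is the Claim_ definition above) =====
theorem cons_penalty_spec : Claim_equal_cons_penalty := by
  intro s_chromo step slots _ hpre
  unfold Spec_cons_penalty cons_penalty cons_penalty_alt
  -- zeta-reduce the lets of both ports
  show (PySem.List.pyRange 0 step 1).foldl (fun acc i =>
      if ((PySem.List.pyRange 0 slots 1).foldl (fun v j =>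
            v + (PySem.Int.ofStr? (PySem.List.pyGetD (PySem.List.pyGetD s_chromo j []) i "")).getD 0) 0) ≠ 0
      then acc + (((PySem.List.pyRange 0 slots 1).foldl (fun v j =>
            v + (PySem.Int.ofStr? (PySem.List.pyGetD (PySem.List.pyGetD s_chromo j []) i "")).getD 0) 0) - 1)
      else acc) 0
    = ((PySem.List.slice s_chromo none (some (max 0 slots))).foldl
          (fun cs row => List.zipWith (fun c x => c + (PySem.Int.ofStr? x).getD 0) cs row)
          (List.replicate step.toNat 0)).foldl (· + ·) 0
      - ((((PySem.List.slice s_chromo none (some (max 0 slots))).foldl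
          (fun cs row => List.zipWith (fun c x => c + (PySem.Int.ofStr? x).getD 0) cs row)
          (List.replicate step.toNat 0)).filter (fun c => c ≠ 0)).length : Int)
  have hslice : PySem.List.slice s_chromo none (some (max 0 slots))
      = s_chromo.take (max 0 slots).toNat := PySem.List.slice_to s_chromo (le_max_left 0 slots)
  by_cases hstep : step ≤ 0
  · -- step ≤ 0: both sides are 0
    have h1 : PySem.List.pyRange 0 step 1 = [] := PySem.List.pyRange_one_eq_nil (by omega)
    have h2 : step.toNat = 0 := by omega
    rw [h1, h2]
    simp [foldl_zip_nil]
  · push Not at hstep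
    by_cases hslots : slots ≤ 0
    · -- slots ≤ 0: no rows are read and every column sum is 0, both sides are 0
      have h1 : PySem.List.pyRange 0 slots 1 = [] := PySem.List.pyRange_one_eq_nil (by omega)
      have h2 : (max 0 slots).toNat = 0 := by omega
      rw [h1, hslice, h2]
      simp [← List.sum_eq_foldl]
    · push Not at hslots
      obtain ⟨hlen, hrows⟩ := hpre hstep hslots
      have h2 : (max 0 slots).toNat = slots.toNat := by omega
      rw [hslice, h2]
      set rows : List (List String) := List.take slots.toNat s_chromo with hrdef
      -- every kept row is long enough for the zip not to truncate
      have hlong : ∀ r ∈ rows, step.toNat ≤ r.length :=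
        fun r hr => (hrows r hr).1
      -- B's colsums as a map over column indices
      have hinit : (List.replicate step.toNat (0 : Int))
          = (List.range step.toNat).map (fun _ => (0 : Int)) := by
        simp [List.map_const']
      have hrange : PySem.List.pyRange 0 step 1 = (List.range step.toNat).map Nat.cast := by
        rw [PySem.List.pyRange_one]
        simp only [sub_zero, zero_add]
      rw [hinit,
          fold_zip (fun x => (PySem.Int.ofStr? x).getD 0) step.toNat rows hlong (fun _ => 0),
          hrange, List.foldl_map]
      -- A's per-column inner fold over row indices is B's fold over the kept rows
      have hlen2 : slots = ((rows.length : ℕ) : Int) := by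
        rw [hrdef]; simp; omega
      have hcol : ∀ k : ℕ,
          ((PySem.List.pyRange 0 slots 1).foldl (fun v j =>
              v + (PySem.Int.ofStr? (PySem.List.pyGetD (PySem.List.pyGetD s_chromo j []) ((k : ℕ) : Int) "")).getD 0) 0)
          = (rows.foldl (fun v r =>
              v + (PySem.Int.ofStr? (r.getD k "")).getD 0) 0) := by
        intro k
        have hrowsEq : ∀ j : ℤ, 0 ≤ j → j < slots →
            PySem.List.pyGetD s_chromo j ([] : List String)
              = PySem.List.pyGetD rows j [] := by
          intro j h0 h1
          conv_lhs => rw [← Int.toNat_of_nonneg h0]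
          conv_rhs => rw [← Int.toNat_of_nonneg h0]
          rw [PySem.List.pyGetD_natCast, PySem.List.pyGetD_natCast]
          have hj2 : j.toNat < slots.toNat := by omega
          have hjlen : j.toNat < s_chromo.length := lt_of_lt_of_le hj2 hlen
          rw [List.getD_eq_getElem _ _ hjlen,
              List.getD_eq_getElem _ _ (by rw [hrdef]; simp; omega)]
          simp only [hrdef]
          exact List.getElem_take.symm
        have stepA : ((PySem.List.pyRange 0 slots 1).foldl (fun v j =>
              v + (PySem.Int.ofStr? (PySem.List.pyGetD (PySem.List.pyGetD s_chromo j []) ((k : ℕ) : Int) "")).getD 0) 0)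
            = ((PySem.List.pyRange 0 slots 1).foldl (fun v j =>
              v + (PySem.Int.ofStr? (PySem.List.pyGetD (PySem.List.pyGetD rows j []) ((k : ℕ) : Int) "")).getD 0) 0) := by
          apply PySem.List.foldl_congr_mem
          intro v j hj
          rw [PySem.List.mem_pyRange_one] at hj
          rw [hrowsEq j hj.1 hj.2]
        rw [stepA, hlen2,
            PySem.List.foldl_pyRange_zero_pyGetD' rows []
              (fun v r => v + (PySem.Int.ofStr? (PySem.List.pyGetD r ((k : ℕ) : Int) "")).getD 0) 0]
        simp only [PySem.List.pyGetD_natCast]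
      have hL : ((List.range step.toNat).foldl (fun acc k =>
          if ((PySem.List.pyRange 0 slots 1).foldl (fun v j =>
                v + (PySem.Int.ofStr? (PySem.List.pyGetD (PySem.List.pyGetD s_chromo j []) ((k : ℕ) : Int) "")).getD 0) 0) ≠ 0
          then acc + (((PySem.List.pyRange 0 slots 1).foldl (fun v j =>
                v + (PySem.Int.ofStr? (PySem.List.pyGetD (PySem.List.pyGetD s_chromo j []) ((k : ℕ) : Int) "")).getD 0) 0) - 1)
          else acc) 0)
        = ((List.range step.toNat).map (fun k => rows.foldl (fun v r =>
              v + (PySem.Int.ofStr? (r.getD k "")).getD 0) 0)).foldl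
            (fun acc v => if v ≠ 0 then acc + (v - 1) else acc) 0 := by
        rw [List.foldl_map]
        apply PySem.List.foldl_congr_mem
        intro acc k _
        rw [hcol k]
      rw [hL, foldl_penalty, ← List.sum_eq_foldl]
      ring
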